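-- pv_equiv track=rewrite | github.com/mhems/aoc | 2015/day25/a.py | get_n_by_pos
-- ===== SOURCE A (Python) =====
-- def get_n_by_pos(i: int, j: int) -> int:
--     r = 1
--     delta = 1
--     for _ in range(1, i):
--         r += delta
--         delta += 1
--     delta = i + 1
--     for _ in range(1, j):
--         r += delta
--         delta += 1
--     return r
-- ===== SOURCE B (Python) =====
-- def get_n_by_pos(i: int, j: int) -> int:
--     a = i - 1 if i > 1 else 0
--     b = j - 1 if j > 1 else 0
--     return 1 + a * (a + 1) // 2 + b * (i + 1) + b * (b - 1) // 2
-- ===== Notes on version B (the rewrite author's own statement) =====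
-- stated objective: faster
-- what changed: Replaced the two accumulation loops (i-1 and j-1 iterations) by a closed-form triangular-number formula evaluated in O(1).
import Mathlib
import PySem

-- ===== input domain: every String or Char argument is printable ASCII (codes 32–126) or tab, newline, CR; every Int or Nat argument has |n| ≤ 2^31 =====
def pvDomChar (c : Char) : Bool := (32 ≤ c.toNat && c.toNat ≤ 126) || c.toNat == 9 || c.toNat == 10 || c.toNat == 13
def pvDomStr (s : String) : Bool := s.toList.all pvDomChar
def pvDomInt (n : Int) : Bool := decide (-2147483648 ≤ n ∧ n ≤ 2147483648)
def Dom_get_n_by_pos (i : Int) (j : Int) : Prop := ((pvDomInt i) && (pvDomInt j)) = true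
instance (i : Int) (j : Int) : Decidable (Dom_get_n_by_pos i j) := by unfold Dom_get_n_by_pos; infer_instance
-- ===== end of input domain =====

-- B replaces A's two accumulation loops with a closed-form triangular-number formula (O(1) vs O(i+j)).


-- ===== PORT A =====
def get_n_by_pos (i : Int) (j : Int) : Int :=
  -- r = 1; delta = 1
  -- for _ in range(1, i): r += delta; delta += 1
  let s1 := (PySem.List.pyRange 1 i 1).foldl
      (fun (s : Int × Int) _ => (s.1 + s.2, s.2 + 1)) (1, 1)
  -- delta = i + 1
  -- for _ in range(1, j): r += delta; delta += 1
  let s2 := (PySem.List.pyRange 1 j 1).foldl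
      (fun (s : Int × Int) _ => (s.1 + s.2, s.2 + 1)) (s1.1, i + 1)
  s2.1

-- ===== PORT B =====
def get_n_by_pos_alt (i : Int) (j : Int) : Int :=
  let a := if i > 1 then i - 1 else 0
  let b := if j > 1 then j - 1 else 0
  1 + PySem.Int.floordiv (a * (a + 1)) 2 + b * (i + 1) + PySem.Int.floordiv (b * (b - 1)) 2

-- ===== PRECONDITION & SPEC =====
def Spec_get_n_by_pos (i : Int) (j : Int) (out : Int) : Prop := out = get_n_by_pos_alt i j
instance (i : Int) (j : Int) (out : Int) : Decidable (Spec_get_n_by_pos i j out) := by unfold Spec_get_n_by_pos; infer_instance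

-- ===== CLAIM (what is proved, stated in full; the proofs are below) =====
def Claim_equal_get_n_by_pos : Prop := ∀ (i : Int) (j : Int), Dom_get_n_by_pos i j → Spec_get_n_by_pos i j (get_n_by_pos i j)

-- ===== LEMMAS AND PROOFS =====

/-- Triangular numbers: triI n = 0 + 1 + … + (n-1). -/
def triI : Nat → Int
  | 0 => 0
  | n + 1 => triI n + n

theorem two_mul_triI (n : Nat) : 2 * triI n = (n : Int) * ((n : Int) - 1) := by
  induction n with
  | zero => simp [triI]
  | succ n ih =>
    have : ((n + 1 : Nat) : Int) * (((n + 1 : Nat) : Int) - 1) = (n : Int) * ((n : Int) - 1) + 2 * n := by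
      push_cast; ring
    rw [this, triI]; omega

theorem floordiv_tri (k : Nat) :
    PySem.Int.floordiv ((k : Int) * ((k : Int) - 1)) 2 = triI k := by
  rw [← two_mul_triI k, PySem.Int.floordiv_eq_ediv_of_pos (by norm_num)]
  exact Int.mul_ediv_cancel_left _ (by norm_num)

theorem floordiv_tri' (k : Nat) :
    PySem.Int.floordiv ((k : Int) * ((k : Int) + 1)) 2 = triI k + k := by
  have h : (k : Int) * ((k : Int) + 1) = 2 * (triI k + k) := by
    have := two_mul_triI k; ring_nf; ring_nf at this; omega
  rw [h, PySem.Int.floordiv_eq_ediv_of_pos (by norm_num)]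
  exact Int.mul_ediv_cancel_left _ (by norm_num)

/-- Invariant of the loop body: folding it over any list of length k starting
from (r, d) gives (r + k*d + triI k, d + k). -/
theorem loop_eq (l : List Int) : ∀ (r d : Int),
    l.foldl (fun (s : Int × Int) _ => (s.1 + s.2, s.2 + 1)) (r, d)
      = (r + (l.length : Int) * d + triI l.length, d + l.length) := by
  induction l with
  | nil => intro r d; simp [triI]
  | cons x l ih =>
    intro r d
    simp only [List.foldl_cons, ih (r + d) (d + 1), List.length_cons, triI]
    push_cast
    refine Prod.ext ?_ ?_ <;> simp <;> ring

theorem get_n_by_pos_closed (i j : Int) :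
    get_n_by_pos i j = 1 + ((i - 1).toNat : Int) + triI (i - 1).toNat
      + ((j - 1).toNat : Int) * (i + 1) + triI (j - 1).toNat := by
  unfold get_n_by_pos
  simp only [loop_eq, PySem.List.length_pyRange_one]
  ring

theorem get_n_by_pos_spec' (i j : Int) : get_n_by_pos i j = get_n_by_pos_alt i j := by
  rw [get_n_by_pos_closed]
  unfold get_n_by_pos_alt
  have ha : (if i > 1 then i - 1 else 0) = (((i - 1).toNat : Nat) : Int) := by
    split_ifs <;> omega
  have hb : (if j > 1 then j - 1 else 0) = (((j - 1).toNat : Nat) : Int) := by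
    split_ifs <;> omega
  simp only [ha, hb, floordiv_tri, floordiv_tri']
  ring

-- ===== VERDICT (by name: the statement is the Claim_ definition above) =====
theorem get_n_by_pos_spec : Claim_equal_get_n_by_pos := by
  intro i j _
  exact get_n_by_pos_spec' i j
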